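-- pv_equiv track=rewrite | github.com/mridulrao/self_learning_agent | state_model/procedure_compiler.py | _infer_col
-- ===== SOURCE A (Python) =====
-- from typing import Any, Dict, List, Literal, Optional, Tuple
--
-- def _infer_col(headers: List[str], preferred: List[str]) -> Optional[str]:
--     hset = {h.strip(): h for h in headers}
--     lower_map = {h.lower().strip(): h for h in headers}
--     for p in preferred:
--         if p in hset:
--             return hset[p]
--         if p.lower() in lower_map:
--             return lower_map[p.lower()]
--     return None
-- ===== SOURCE B (Python) =====
-- from typing import List, Optional
--
-- def _infer_col(headers: List[str], preferred: List[str]) -> Optional[str]: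
--     # Single pass over headers: rank each header by the first preferred name it
--     # matches (exact-stripped match at index i -> rank 2*i, case-insensitive ->
--     # rank 2*i+1) and keep the lowest-ranked header, later headers winning ties.
--     pairs = [(p, p.lower()) for p in preferred]
--     best = None  # (rank, header)
--     for h in headers:
--         hs = h.strip()
--         hl = h.lower().strip()
--         r = None
--         for i, (p, pl) in enumerate(pairs):
--             if hs == p:
--                 r = 2 * i
--                 break
--             if hl == pl:
--                 r = 2 * i + 1
--                 break
--         if r is not None and (best is None or r <= best[0]):
--             best = (r, h)
--     return best[1] if best is not None else None
-- ===== Notes on version B (the rewrite author's own statement) =====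
-- stated objective: alternative
-- what changed: Inverted the loop structure: instead of building two dicts and looking up each preferred name, B makes a single pass over headers, ranking each header by the first preferred name it matches (exact=2i, case-insensitive=2i+1) and keeping the minimum-rank header with later headers winning ties.
import Mathlib
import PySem

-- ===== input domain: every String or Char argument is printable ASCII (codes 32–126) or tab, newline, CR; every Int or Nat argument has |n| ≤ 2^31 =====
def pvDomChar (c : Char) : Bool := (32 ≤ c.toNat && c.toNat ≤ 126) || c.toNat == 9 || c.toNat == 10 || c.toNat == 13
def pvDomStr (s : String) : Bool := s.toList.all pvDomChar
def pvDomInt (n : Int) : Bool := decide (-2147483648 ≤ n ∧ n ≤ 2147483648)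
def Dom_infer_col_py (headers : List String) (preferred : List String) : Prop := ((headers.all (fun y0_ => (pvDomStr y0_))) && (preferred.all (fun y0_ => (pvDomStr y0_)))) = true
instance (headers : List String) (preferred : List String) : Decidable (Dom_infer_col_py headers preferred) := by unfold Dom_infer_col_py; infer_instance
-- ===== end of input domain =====

-- B inverts the loops: one pass over headers keeping the header with the lowest
-- preferred-rank (exact match at i -> 2i, case-insensitive -> 2i+1, ties -> later
-- header), instead of A's per-preferred dict lookups (alternative decomposition).

-- ===== PORT A =====
-- the 'for p in preferred' loop of A, with the two prebuilt dicts
def inferLoopA (hset lowerMap : PySem.Dict String String) : List String → Option String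
  | [] => none
  | p :: ps =>
    if (hset.contains p) then some (hset.getD p "")
    else if (lowerMap.contains (PySem.Str.lower p)) then some (lowerMap.getD (PySem.Str.lower p) "")
    else inferLoopA hset lowerMap ps

def infer_col_py (headers : List String) (preferred : List String) : Option String :=
  let hset : PySem.Dict String String :=
    headers.foldl (fun d h => d.insert (PySem.Str.strip h) h) PySem.Dict.empty
  let lowerMap : PySem.Dict String String :=
    headers.foldl (fun d h => d.insert (PySem.Str.strip (PySem.Str.lower h)) h) PySem.Dict.empty
  inferLoopA hset lowerMap preferred

-- ===== PORT B =====
-- the inner 'for i, (p, pl) in enumerate(pairs)' loop of B: rank of one header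
def headerRank (hs hl : String) : List (String × String) → Nat → Option Nat
  | [], _ => none
  | (p, pl) :: rest, i =>
    if hs == p then some (2 * i)
    else if hl == pl then some (2 * i + 1)
    else headerRank hs hl rest (i + 1)

def infer_col_py_alt (headers : List String) (preferred : List String) : Option String :=
  let pairs := preferred.map (fun p => (p, PySem.Str.lower p))
  let best := headers.foldl (fun best h =>
    let hs := PySem.Str.strip h
    let hl := PySem.Str.strip (PySem.Str.lower h)
    match headerRank hs hl pairs 0 with
    | none => best
    | some r =>
      match best with
      | none => some (r, h)
      | some (br, bh) => if r ≤ br then some (r, h) else some (br, bh)) (none : Option (Nat × String))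
  best.map Prod.snd

-- ===== PRECONDITION & SPEC =====
def Spec_infer_col_py (headers : List String) (preferred : List String) (out : Option String) : Prop := out = infer_col_py_alt headers preferred
instance (headers : List String) (preferred : List String) (out : Option String) : Decidable (Spec_infer_col_py headers preferred out) := by unfold Spec_infer_col_py; infer_instance

-- ===== CLAIM (what is proved, stated in full; the proofs are below) =====
def Claim_equal_infer_col_py : Prop := ∀ (headers : List String) (preferred : List String), Dom_infer_col_py headers preferred → Spec_infer_col_py headers preferred (infer_col_py headers preferred)

-- ===== LEMMAS AND PROOFS =====

-- A's staged-scan reading: for each p, last header with strip == p, else last with lower-strip match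
def scanStaged (rev : List String) : List String → Option String
  | [] => none
  | p :: ps =>
    match rev.find? (fun h => PySem.Str.strip h == p) with
    | some h => some h
    | none =>
      match rev.find? (fun h => PySem.Str.strip (PySem.Str.lower h) == PySem.Str.lower p) with
      | some h => some h
      | none => scanStaged rev ps

-- ranked staged scan
def scanR (rev : List String) : List String → Nat → Option (Nat × String)
  | [], _ => none
  | p :: ps, i =>
    match rev.find? (fun h => PySem.Str.strip h == p) with
    | some h => some (2 * i, h)
    | none =>
      match rev.find? (fun h => PySem.Str.strip (PySem.Str.lower h) == PySem.Str.lower p) with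
      | some h => some (2 * i + 1, h)
      | none => scanR rev ps (i + 1)

-- left-biased min-rank merge
def mergeL : Option (Nat × String) → Option (Nat × String) → Option (Nat × String)
  | none, y => y
  | some x, none => some x
  | some x, some y => if x.1 ≤ y.1 then some x else some y

def rkI (ps : List String) (i : Nat) (h : String) : Option (Nat × String) :=
  (headerRank (PySem.Str.strip h) (PySem.Str.strip (PySem.Str.lower h))
      (ps.map (fun p => (p, PySem.Str.lower p))) i).map (fun r => (r, h))

theorem get?_foldl_insert (f : String → String) (k : String) :
    ∀ (xs : List String) (d0 : PySem.Dict String String),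
      (xs.foldl (fun d h => d.insert (f h) h) d0).get? k =
        ((xs.reverse.find? (fun h => f h == k)).orElse (fun _ => d0.get? k)) := by
  intro xs
  induction xs with
  | nil => intro d0; simp
  | cons h t ih =>
    intro d0
    simp only [List.foldl_cons, ih, List.reverse_cons, List.find?_append]
    by_cases hk : f h = k
    · subst hk
      simp [PySem.Dict.get?_insert_self, Option.orElse]
      cases t.reverse.find? (fun h' => f h' == f h) <;> simp
    · rw [PySem.Dict.get?_insert_of_ne _ _ (fun e => hk e.symm)]
      simp only [List.find?_cons, List.find?_nil]
      have : (f h == k) = false := by simp [hk]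
      simp only [this]
      cases t.reverse.find? (fun h' => f h' == k) <;> simp [Option.orElse]

theorem get?_eq_find (f : String → String) (k : String) (xs : List String) :
    (xs.foldl (fun d h => d.insert (f h) h) PySem.Dict.empty).get? k =
      xs.reverse.find? (fun h => f h == k) := by
  rw [get?_foldl_insert]
  cases xs.reverse.find? (fun h => f h == k) <;> simp [Option.orElse, PySem.Dict.empty, PySem.Dict.get?]

theorem a_eq_scanStaged (headers : List String) (ps : List String) :
    infer_col_py headers ps = scanStaged headers.reverse ps := by
  unfold infer_col_py
  induction ps with
  | nil => rfl
  | cons p ps ih =>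
    rw [inferLoopA, scanStaged]
    have h1 := get?_eq_find (fun h => PySem.Str.strip h) p headers
    have h2 := get?_eq_find (fun h => PySem.Str.strip (PySem.Str.lower h)) (PySem.Str.lower p) headers
    have hc1 : (headers.foldl (fun d h => d.insert (PySem.Str.strip h) h) PySem.Dict.empty).contains p
        = (headers.reverse.find? (fun h => PySem.Str.strip h == p)).isSome := by
      rw [PySem.Dict.contains_eq_isSome_get?, h1]
    have hc2 : (headers.foldl (fun d h => d.insert (PySem.Str.strip (PySem.Str.lower h)) h) PySem.Dict.empty).contains (PySem.Str.lower p)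
        = (headers.reverse.find? (fun h => PySem.Str.strip (PySem.Str.lower h) == PySem.Str.lower p)).isSome := by
      rw [PySem.Dict.contains_eq_isSome_get?, h2]
    rw [hc1, hc2]
    cases e1 : headers.reverse.find? (fun h => PySem.Str.strip h == p) with
    | some h => simp [PySem.Dict.getD, h1, e1]
    | none =>
      simp only [Option.isSome_none, Bool.false_eq_true, if_false]
      cases e2 : headers.reverse.find? (fun h => PySem.Str.strip (PySem.Str.lower h) == PySem.Str.lower p) with
      | some h => simp [PySem.Dict.getD, h2, e2]
      | none => simpa using ih

theorem headerRank_lb (hs hl : String) :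
    ∀ (prs : List (String × String)) (i r : Nat), headerRank hs hl prs i = some r → 2 * i ≤ r := by
  intro prs
  induction prs with
  | nil => intro i r h; simp [headerRank] at h
  | cons q rest ih =>
    intro i r h
    rw [headerRank] at h
    split_ifs at h with h1 h2
    · cases h; omega
    · cases h; omega
    · have := ih (i + 1) r h; omega

theorem scanR_lb (rev : List String) :
    ∀ (ps : List String) (i : Nat) (r : Nat) (h : String), scanR rev ps i = some (r, h) → 2 * i ≤ r := by
  intro ps
  induction ps with
  | nil => intro i r h e; simp [scanR] at e
  | cons p ps ih =>
    intro i r h e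
    rw [scanR] at e
    cases e1 : rev.find? (fun h => PySem.Str.strip h == p) with
    | some h2 => rw [e1] at e; cases e; omega
    | none =>
      rw [e1] at e
      cases e2 : rev.find? (fun h => PySem.Str.strip (PySem.Str.lower h) == PySem.Str.lower p) with
      | some h2 => rw [e2] at e; cases e; omega
      | none => rw [e2] at e; have := ih (i + 1) r h e; omega

theorem scanStaged_eq_scanR (rev : List String) :
    ∀ (ps : List String) (i : Nat), scanStaged rev ps = (scanR rev ps i).map Prod.snd := by
  intro ps
  induction ps with
  | nil => intro i; rfl
  | cons p ps ih =>
    intro i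
    rw [scanStaged, scanR]
    cases e1 : rev.find? (fun h => PySem.Str.strip h == p) with
    | some h => simp
    | none =>
      cases e2 : rev.find? (fun h => PySem.Str.strip (PySem.Str.lower h) == PySem.Str.lower p) with
      | some h => simp
      | none => simpa using ih (i + 1)

theorem mergeL_none_right (x : Option (Nat × String)) : mergeL x none = x := by
  cases x <;> rfl

theorem mergeL_assoc (x y z : Option (Nat × String)) :
    mergeL (mergeL x y) z = mergeL x (mergeL y z) := by
  cases x <;> cases y <;> cases z <;>
    repeat (first | rfl | omega | simp only [mergeL] | split_ifs)

-- the key: prepending a header to the reversed scan list merges in its rank (left-biased)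
theorem scanR_cons (h : String) (rev : List String) :
    ∀ (ps : List String) (i : Nat), scanR (h :: rev) ps i = mergeL (rkI ps i h) (scanR rev ps i) := by
  intro ps
  induction ps with
  | nil => intro i; rfl
  | cons p ps ih =>
    intro i
    rw [scanR, scanR]
    unfold rkI
    simp only [List.map_cons]
    rw [headerRank]
    by_cases e1 : PySem.Str.strip h == p
    · simp only [List.find?_cons, e1]
      cases e2 : rev.find? (fun h' => PySem.Str.strip h' == p) with
      | some h2 =>
        simp [mergeL]
      | none =>
        cases e3 : rev.find? (fun h' => PySem.Str.strip (PySem.Str.lower h') == PySem.Str.lower p) with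
        | some h2 => simp [mergeL]
        | none =>
          cases e4 : scanR rev ps (i + 1) with
          | none => simp [mergeL]
          | some rh =>
            have := scanR_lb rev ps (i + 1) rh.1 rh.2 (by simpa using e4)
            simp [mergeL]; omega
    · simp only [List.find?_cons, e1]
      by_cases e2 : PySem.Str.strip (PySem.Str.lower h) == PySem.Str.lower p
      · simp only [e2]
        cases e3 : rev.find? (fun h' => PySem.Str.strip h' == p) with
        | some h2 => simp [mergeL]
        | none =>
          cases e4 : rev.find? (fun h' => PySem.Str.strip (PySem.Str.lower h') == PySem.Str.lower p) with
          | some h2 => simp [mergeL]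
          | none =>
            cases e5 : scanR rev ps (i + 1) with
            | none => simp [mergeL]
            | some rh =>
              have := scanR_lb rev ps (i + 1) rh.1 rh.2 (by simpa using e5)
              simp [mergeL]; omega
      · simp only [e2]
        cases e3 : rev.find? (fun h' => PySem.Str.strip h' == p) with
        | some h2 =>
          cases e6 : headerRank (PySem.Str.strip h) (PySem.Str.strip (PySem.Str.lower h))
              (ps.map (fun p => (p, PySem.Str.lower p))) (i + 1) with
          | none => simp [mergeL]
          | some r =>
            have := headerRank_lb _ _ _ _ _ e6
            simp [mergeL]; omega
        | none =>
          cases e4 : rev.find? (fun h' => PySem.Str.strip (PySem.Str.lower h') == PySem.Str.lower p) with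
          | some h2 =>
            cases e6 : headerRank (PySem.Str.strip h) (PySem.Str.strip (PySem.Str.lower h))
                (ps.map (fun p => (p, PySem.Str.lower p))) (i + 1) with
            | none => simp [mergeL]
            | some r =>
              have := headerRank_lb _ _ _ _ _ e6
              simp [mergeL]; omega
          | none => simpa [rkI] using ih (i + 1)

-- B's fold step is a left-biased merge of the header's rank into the accumulator
theorem step_eq_mergeL (ps : List String) (best : Option (Nat × String)) (h : String) :
    (match headerRank (PySem.Str.strip h) (PySem.Str.strip (PySem.Str.lower h))
        (ps.map (fun p => (p, PySem.Str.lower p))) 0 with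
     | none => best
     | some r =>
       match best with
       | none => some (r, h)
       | some (br, bh) => if r ≤ br then some (r, h) else some (br, bh)) =
    mergeL (rkI ps 0 h) best := by
  unfold rkI
  cases headerRank (PySem.Str.strip h) (PySem.Str.strip (PySem.Str.lower h))
      (ps.map (fun p => (p, PySem.Str.lower p))) 0 with
  | none => cases best <;> rfl
  | some r => cases best with
    | none => rfl
    | some b => simp [mergeL]

theorem scanR_nil (ps : List String) : ∀ i, scanR [] ps i = none := by
  induction ps with
  | nil => intro i; rfl
  | cons p ps ih => intro i; rw [scanR]; simpa using ih (i + 1)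

theorem scanR_append (ps : List String) :
    ∀ (xs ys : List String) (i : Nat),
      scanR (xs ++ ys) ps i = mergeL (scanR xs ps i) (scanR ys ps i) := by
  intro xs
  induction xs with
  | nil => intro ys i; simp [scanR_nil, mergeL]
  | cons x xs ihx =>
    intro ys i
    rw [List.cons_append, scanR_cons, scanR_cons, ihx, mergeL_assoc]

theorem scanR_singleton (ps : List String) (h : String) (i : Nat) :
    scanR [h] ps i = rkI ps i h := by
  rw [show [h] = h :: ([] : List String) from rfl, scanR_cons, scanR_nil, mergeL_none_right]

theorem fold_eq_scanR (ps : List String) :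
    ∀ (headers : List String) (acc : Option (Nat × String)),
      headers.foldl (fun best h =>
        match headerRank (PySem.Str.strip h) (PySem.Str.strip (PySem.Str.lower h))
            (ps.map (fun p => (p, PySem.Str.lower p))) 0 with
        | none => best
        | some r =>
          match best with
          | none => some (r, h)
          | some (br, bh) => if r ≤ br then some (r, h) else some (br, bh)) acc
      = mergeL (scanR headers.reverse ps 0) acc := by
  intro headers
  induction headers with
  | nil => intro acc; simp [scanR_nil, mergeL]
  | cons h t ih =>
    intro acc
    rw [List.foldl_cons, step_eq_mergeL, ih]
    rw [show (h :: t).reverse = t.reverse ++ [h] by simp]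
    rw [scanR_append, scanR_singleton, mergeL_assoc]

-- ===== VERDICT (by name: the statement is the Claim_ definition above) =====
theorem infer_col_py_spec : Claim_equal_infer_col_py := by
  intro headers preferred _
  unfold Spec_infer_col_py infer_col_py_alt
  rw [a_eq_scanStaged, scanStaged_eq_scanR headers.reverse preferred 0]
  simp only [fold_eq_scanR preferred headers none, mergeL_none_right]
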